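-- pv_equiv track=rewrite | github.com/seungjaejeon/for_pccp | day4/홀짝트리.py | solution
-- ===== SOURCE A (Python) =====
-- from collections import defaultdict, deque
--
-- def solution(nodes, edges):
--     """
--     nodes: 노드 번호 배열 (예: [1,2,3,...])
--     edges: 간선 리스트 (예: [[u,v], ...]) — 무방향, 전체가 포레스트일 수 있음
--     return: [홀짝_트리_개수, 역홀짝_트리_개수]
--     """
--
--     # 인접 리스트 & 차수
--     adj = defaultdict(list)
--
--     for u, v in edges:
--         adj[u].append(v)
--         adj[v].append(u)
--
--     # 혹시 단독 노드가 있어도 처리되도록 미리 키 생성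
--     for x in nodes:
--         adj[x]  # touch
--
--     visited = set()
--     ans_odd_even = 0       # 홀짝 트리로 만들 수 있는 컴포넌트 개수
--     ans_rev_odd_even = 0   # 역홀짝 트리로 만들 수 있는 컴포넌트 개수
--
--     for start in nodes:
--         if start in visited:
--             continue
--
--         # 한 컴포넌트 순회
--         q = deque([start])
--         visited.add(start)
--
--         cnt_odd = 0          # 홀수 노드
--         cnt_even = 0         # 짝수 노드
--         cnt_rev_odd = 0      # 역홀수 노드
--         cnt_rev_even = 0     # 역짝수 노드
--
--         while q:
--             u = q.popleft()
--             deg_parity = len(adj[u]) % 2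
--             u_parity = u % 2
--
--             # 분류 규칙 (차수 짝/홀 × 노드번호 짝/홀)
--             if deg_parity == 1 and u_parity == 1:
--                 cnt_odd += 1
--             elif deg_parity == 0 and u_parity == 0:
--                 cnt_even += 1
--             elif deg_parity == 0 and u_parity == 1:
--                 cnt_rev_odd += 1
--             else:  # deg_parity == 1 and u_parity == 0
--                 cnt_rev_even += 1
--
--             for v in adj[u]:
--                 if v not in visited:
--                     visited.add(v)
--                     q.append(v)
--
--         # 이 컴포넌트가 "홀짝 트리"가 될 수 있는가?
--         if (cnt_rev_odd == 1 and cnt_rev_even == 0) or (cnt_rev_odd == 0 and cnt_rev_even == 1):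
--             ans_odd_even += 1
--
--         # 이 컴포넌트가 "역홀짝 트리"가 될 수 있는가?
--         if (cnt_odd == 1 and cnt_even == 0) or (cnt_odd == 0 and cnt_even == 1):
--             ans_rev_odd_even += 1
--
--     return [ans_rev_odd_even, ans_odd_even]
-- ===== SOURCE B (Python) =====
-- def solution(nodes, edges):
--     # Degree of every endpoint: one Counter-style pass over the edge list.
--     deg = {}
--     for e in edges:
--         u, v = e
--         deg[u] = deg.get(u, 0) + 1
--         deg[v] = deg.get(v, 0) + 1
--
--     # Connected components by label propagation: every endpoint carries a
--     # component label; each edge merges the two labels (no traversal at all).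
--     label = {}
--     for e in edges:
--         u, v = e
--         if u not in label:
--             label[u] = u
--         if v not in label:
--             label[v] = v
--         lu, lv = label[u], label[v]
--         if lu != lv:
--             label = {x: (lu if l == lv else l) for x, l in label.items()}
--
--     seen = set()
--     ans_rev = 0
--     ans_oe = 0
--     for x in nodes:
--         if x in seen:
--             continue
--         if x in label:
--             lx = label[x]
--             blk = [y for y in label if label[y] == lx]
--         else:
--             blk = [x]
--         seen.update(blk)
--         co = sum(1 for y in blk if y % 2 == 1 and deg.get(y, 0) % 2 == 1)
--         ce = sum(1 for y in blk if y % 2 == 0 and deg.get(y, 0) % 2 == 0)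
--         cro = sum(1 for y in blk if y % 2 == 1 and deg.get(y, 0) % 2 == 0)
--         cre = sum(1 for y in blk if y % 2 == 0 and deg.get(y, 0) % 2 == 1)
--         if (cro, cre) in ((1, 0), (0, 1)):
--             ans_oe += 1
--         if (co, ce) in ((1, 0), (0, 1)):
--             ans_rev += 1
--     return [ans_rev, ans_oe]
-- ===== Notes on version B (the rewrite author's own statement) =====
-- stated objective: alternative
-- what changed: BFS traversal with a deque over adjacency lists is replaced by label-propagation component merging over the edge list (no graph traversal), a degree counter built directly from edge endpoints instead of adjacency-list lengths, and per-component class counts computed by filtering the component after the fact instead of during the traversal.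
import Mathlib
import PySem

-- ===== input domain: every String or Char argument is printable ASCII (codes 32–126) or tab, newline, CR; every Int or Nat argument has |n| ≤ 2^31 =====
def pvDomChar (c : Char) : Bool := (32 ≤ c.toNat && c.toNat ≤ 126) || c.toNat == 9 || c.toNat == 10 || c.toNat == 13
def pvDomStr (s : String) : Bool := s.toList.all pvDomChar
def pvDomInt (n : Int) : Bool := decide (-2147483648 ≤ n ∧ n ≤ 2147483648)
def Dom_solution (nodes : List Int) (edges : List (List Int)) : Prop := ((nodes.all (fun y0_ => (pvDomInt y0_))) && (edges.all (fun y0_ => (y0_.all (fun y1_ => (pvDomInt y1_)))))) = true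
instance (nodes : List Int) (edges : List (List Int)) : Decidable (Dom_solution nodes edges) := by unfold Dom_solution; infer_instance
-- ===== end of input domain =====

-- B replaces A's per-component BFS traversal by label-propagation merging over the edge
-- list plus an endpoint-degree counter; same return value (objective: alternative).

-- ===== PORT A =====
-- adjacency defaultdict: adj[u].append(v); adj[v].append(u)
def buildAdjA (edges : List (List Int)) : PySem.Dict Int (List Int) :=
  edges.foldl (fun d e =>
    match e with
    | [u, v] =>
      let d1 := d.insert u (d.getD u [] ++ [v])
      d1.insert v (d1.getD v [] ++ [u])
    | _ => d) PySem.Dict.empty   -- length ≠ 2: Python raises ValueError (outside Pre_)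

-- for x in nodes: adj[x]  (defaultdict touch creates the key)
def touchA (d : PySem.Dict Int (List Int)) (nodes : List Int) : PySem.Dict Int (List Int) :=
  nodes.foldl (fun d x => if d.contains x then d else d.insert x []) d

-- the BFS while loop; fuel is only a totality guard (adj.keys.length + 1 always suffices)
def bfsLoop (adj : PySem.Dict Int (List Int)) :
    Nat → List Int → PySem.Set Int → Int → Int → Int → Int →
    PySem.Set Int × Int × Int × Int × Int
  | 0, _, vis, co, ce, cro, cre => (vis, co, ce, cro, cre)
  | _ + 1, [], vis, co, ce, cro, cre => (vis, co, ce, cro, cre)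
  | fuel + 1, u :: q, vis, co, ce, cro, cre =>
    let nbrs := adj.getD u []
    let dp := PySem.Int.mod (Int.ofNat nbrs.length) 2
    let up := PySem.Int.mod u 2
    let c : Int × Int × Int × Int :=
      if dp = 1 ∧ up = 1 then (co + 1, ce, cro, cre)
      else if dp = 0 ∧ up = 0 then (co, ce + 1, cro, cre)
      else if dp = 0 ∧ up = 1 then (co, ce, cro + 1, cre)
      else (co, ce, cro, cre + 1)
    let s := nbrs.foldl (fun (p : PySem.Set Int × List Int) v =>
        if v ∈ p.1 then p else (PySem.Set.add p.1 v, p.2 ++ [v])) (vis, q)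
    bfsLoop adj fuel s.2 s.1 c.1 c.2.1 c.2.2.1 c.2.2.2

def solution (nodes : List Int) (edges : List (List Int)) : List Int :=
  let adj := touchA (buildAdjA edges) nodes
  let st := nodes.foldl (fun (st : PySem.Set Int × Int × Int) start =>
    if start ∈ st.1 then st
    else
      let vis := PySem.Set.add st.1 start
      let r := bfsLoop adj (adj.keys.length + 1) [start] vis 0 0 0 0
      let aoe := if (r.2.2.2.1 = 1 ∧ r.2.2.2.2 = 0) ∨ (r.2.2.2.1 = 0 ∧ r.2.2.2.2 = 1)
                 then st.2.1 + 1 else st.2.1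
      let aroe := if (r.2.1 = 1 ∧ r.2.2.1 = 0) ∨ (r.2.1 = 0 ∧ r.2.2.1 = 1)
                  then st.2.2 + 1 else st.2.2
      (r.1, aoe, aroe)) (PySem.Set.empty, 0, 0)
  [st.2.2, st.2.1]

-- ===== PORT B =====
-- deg[u] = deg.get(u, 0) + 1 for each endpoint
def buildDegB (edges : List (List Int)) : PySem.Dict Int Int :=
  edges.foldl (fun d e =>
    match e with
    | [u, v] =>
      let d1 := d.insert u (d.getD u 0 + 1)
      d1.insert v (d1.getD v 0 + 1)
    | _ => d) PySem.Dict.empty   -- length ≠ 2: Python raises ValueError (outside Pre_)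

-- label = {x: (lu if l == lv else l) for x, l in label.items()}
def relabelB (d : PySem.Dict Int Int) (lv lu : Int) : PySem.Dict Int Int :=
  d.items.foldl (fun acc p => acc.insert p.1 (if p.2 = lv then lu else p.2)) PySem.Dict.empty

def labelStepB (d : PySem.Dict Int Int) (e : List Int) : PySem.Dict Int Int :=
  match e with
  | [u, v] =>
    let d0 := if d.contains u then d else d.insert u u
    let d1 := if d0.contains v then d0 else d0.insert v v
    let lu := d1.getD u u   -- label[u] (key is present)
    let lv := d1.getD v v   -- label[v]
    if lu ≠ lv then relabelB d1 lv lu else d1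
  | _ => d

-- blk = [y for y in label if label[y] == lx]  (or [x] when x has no edge)
def blockOfB (label : PySem.Dict Int Int) (x : Int) : List Int :=
  match label.get? x with
  | some lx => label.keys.filter (fun y => label.getD y y = lx)
  | none => [x]

-- sum(1 for y in blk if y % 2 == yp and deg.get(y, 0) % 2 == dp)
def countIfB (blk : List Int) (deg : PySem.Dict Int Int) (yp dp : Int) : Int :=
  Int.ofNat (blk.countP (fun y =>
    decide (PySem.Int.mod y 2 = yp ∧ PySem.Int.mod (deg.getD y 0) 2 = dp)))

def solution_alt (nodes : List Int) (edges : List (List Int)) : List Int :=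
  let deg := buildDegB edges
  let label := edges.foldl labelStepB PySem.Dict.empty
  let st := nodes.foldl (fun (st : PySem.Set Int × Int × Int) x =>
    if x ∈ st.1 then st
    else
      let blk := blockOfB label x
      let seen := PySem.Set.update st.1 blk
      let co := countIfB blk deg 1 1
      let ce := countIfB blk deg 0 0
      let cro := countIfB blk deg 1 0
      let cre := countIfB blk deg 0 1
      let arev := if (co = 1 ∧ ce = 0) ∨ (co = 0 ∧ ce = 1) then st.2.1 + 1 else st.2.1
      let aoe := if (cro = 1 ∧ cre = 0) ∨ (cro = 0 ∧ cre = 1) then st.2.2 + 1 else st.2.2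
      (seen, arev, aoe)) (PySem.Set.empty, 0, 0)
  [st.2.1, st.2.2]

-- ===== PRECONDITION & SPEC =====
-- Pre_ excludes only edge entries that are not pairs: there Python's 'for u, v in edges'
-- raises ValueError in both A and B.
def Pre_solution (nodes : List Int) (edges : List (List Int)) : Prop :=
  ∀ e ∈ edges, e.length = 2
instance (nodes : List Int) (edges : List (List Int)) : Decidable (Pre_solution nodes edges) := by
  unfold Pre_solution; infer_instance

def pvWitness_solution : List Int × List (List Int) := ([1, 2, 3], [[1, 2]])

def Spec_solution (nodes : List Int) (edges : List (List Int)) (out : List Int) : Prop :=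
  out = solution_alt nodes edges
instance (nodes : List Int) (edges : List (List Int)) (out : List Int) :
    Decidable (Spec_solution nodes edges out) := by unfold Spec_solution; infer_instance

-- ===== CLAIM (what is proved, stated in full; the proofs are below) =====
def Claim_equal_solution : Prop := ∀ (nodes : List Int) (edges : List (List Int)),
  Dom_solution nodes edges → Pre_solution nodes edges →
  Spec_solution nodes edges (solution nodes edges)

-- ===== LEMMAS AND PROOFS =====

-- the undirected edge relation and reachability
def adjRel (edges : List (List Int)) (u v : Int) : Prop := [u, v] ∈ edges ∨ [v, u] ∈ edges
def Reach (edges : List (List Int)) : Int → Int → Prop := Relation.ReflTransGen (adjRel edges)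
def Supp (edges : List (List Int)) (x : Int) : Prop := ∃ v, adjRel edges x v

theorem adjRel_symm {edges : List (List Int)} {u v : Int} (h : adjRel edges u v) :
    adjRel edges v u := h.elim Or.inr Or.inl

theorem reach_symm {edges : List (List Int)} {u v : Int} (h : Reach edges u v) :
    Reach edges v u :=
  Relation.ReflTransGen.symmetric (fun _ _ h => adjRel_symm h) h

theorem reach_supp {edges : List (List Int)} {x y : Int} (h : Reach edges x y) :
    x = y ∨ (Supp edges x ∧ Supp edges y) := by
  induction h with
  | refl => exact Or.inl rfl
  | tail h1 h2 ih =>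
      right
      refine ⟨?_, ⟨_, adjRel_symm h2⟩⟩
      rcases ih with rfl | ⟨hx, _⟩
      · exact ⟨_, h2⟩
      · exact hx

theorem reach_mono {es : List (List Int)} {e : List Int} {x y : Int}
    (h : Reach es x y) : Reach (es ++ [e]) x y := by
  induction h with
  | refl => exact Relation.ReflTransGen.refl
  | tail h1 h2 ih =>
      exact ih.tail (h2.elim (fun m => Or.inl (List.mem_append_left _ m))
        (fun m => Or.inr (List.mem_append_left _ m)))

theorem adjRel_snoc {es : List (List Int)} {u v x y : Int} :
    adjRel (es ++ [[u, v]]) x y ↔ adjRel es x y ∨ (x = u ∧ y = v) ∨ (x = v ∧ y = u) := by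
  simp only [adjRel, List.mem_append, List.mem_singleton]
  constructor
  · rintro (h | h) <;> rcases h with h | h
    · exact Or.inl (Or.inl h)
    · simp at h; exact Or.inr (Or.inl ⟨h.1, h.2⟩)
    · exact Or.inl (Or.inr h)
    · simp at h; exact Or.inr (Or.inr ⟨h.2, h.1⟩)
  · rintro ((h | h) | ⟨rfl, rfl⟩ | ⟨rfl, rfl⟩)
    · exact Or.inl (Or.inl h)
    · exact Or.inr (Or.inl h)
    · exact Or.inl (Or.inr (by simp))
    · exact Or.inr (Or.inr (by simp))

theorem reach_snoc {es : List (List Int)} {u v x y : Int} :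
    Reach (es ++ [[u, v]]) x y ↔
      Reach es x y ∨ (Reach es x u ∧ Reach es v y) ∨ (Reach es x v ∧ Reach es u y) := by
  constructor
  · intro h
    induction h with
    | refl => exact Or.inl Relation.ReflTransGen.refl
    | tail h1 h2 ih =>
        rw [adjRel_snoc] at h2
        rcases h2 with h2 | ⟨rfl, rfl⟩ | ⟨rfl, rfl⟩
        · rcases ih with ih | ⟨ia, ib⟩ | ⟨ia, ib⟩
          · exact Or.inl (ih.tail h2)
          · exact Or.inr (Or.inl ⟨ia, ib.tail h2⟩)
          · exact Or.inr (Or.inr ⟨ia, ib.tail h2⟩)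
        · rcases ih with ih | ⟨ia, ib⟩ | ⟨ia, ib⟩
          · exact Or.inr (Or.inl ⟨ih, Relation.ReflTransGen.refl⟩)
          · exact Or.inr (Or.inl ⟨ia, Relation.ReflTransGen.refl⟩)
          · exact Or.inl ia
        · rcases ih with ih | ⟨ia, ib⟩ | ⟨ia, ib⟩
          · exact Or.inr (Or.inr ⟨ih, Relation.ReflTransGen.refl⟩)
          · exact Or.inl ia
          · exact Or.inr (Or.inr ⟨ia, Relation.ReflTransGen.refl⟩)
  · have hedge : adjRel (es ++ [[u, v]]) u v := Or.inl (by simp)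
    rintro (h | ⟨h1, h2⟩ | ⟨h1, h2⟩)
    · exact reach_mono h
    · exact ((reach_mono h1).tail hedge).trans (reach_mono h2)
    · exact ((reach_mono h1).tail (adjRel_symm hedge)).trans (reach_mono h2)

theorem reach_snoc_same {es : List (List Int)} {u v x y : Int} (huv : Reach es u v) :
    Reach (es ++ [[u, v]]) x y ↔ Reach es x y := by
  rw [reach_snoc]
  constructor
  · rintro (h | ⟨h1, h2⟩ | ⟨h1, h2⟩)
    · exact h
    · exact (h1.trans huv).trans h2
    · exact (h1.trans (reach_symm huv)).trans h2
  · exact Or.inl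

-- ===== A-side: the adjacency dict =====
theorem getD_touchA (ns : List Int) (d : PySem.Dict Int (List Int)) (u : Int) :
    (touchA d ns).getD u [] = d.getD u [] := by
  induction ns generalizing d with
  | nil => rfl
  | cons x ns ih =>
      unfold touchA at ih ⊢
      simp only [List.foldl_cons]
      by_cases hc : d.contains x
      · simp only [hc, if_true, ih]
      · simp only [hc, Bool.false_eq_true, if_false, ih]
        rw [PySem.Dict.getD_insert]
        split_ifs with hu
        · subst hu
          exact (PySem.Dict.getD_of_not_contains d ([] : List Int) (by simpa using hc)).symm
        · rfl

theorem contains_touchA (ns : List Int) (d : PySem.Dict Int (List Int)) (u : Int) :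
    (touchA d ns).contains u = true ↔ d.contains u = true ∨ u ∈ ns := by
  induction ns generalizing d with
  | nil => simp [touchA]
  | cons x ns ih =>
      unfold touchA at ih ⊢
      simp only [List.foldl_cons, List.mem_cons]
      by_cases hc : d.contains x
      · rw [if_pos hc, ih]
        constructor
        · rintro (h | h) <;> tauto
        · rintro (h | rfl | h) <;> tauto
      · rw [if_neg hc, ih]
        simp only [PySem.Dict.contains_insert, Bool.or_eq_true, beq_iff_eq]
        tauto

def adjStep (d : PySem.Dict Int (List Int)) (e : List Int) : PySem.Dict Int (List Int) :=
  match e with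
  | [u, v] =>
    let d1 := d.insert u (d.getD u [] ++ [v])
    d1.insert v (d1.getD v [] ++ [u])
  | _ => d

theorem buildAdjA_eq (edges : List (List Int)) :
    buildAdjA edges = edges.foldl adjStep PySem.Dict.empty := rfl

def degStep (d : PySem.Dict Int Int) (e : List Int) : PySem.Dict Int Int :=
  match e with
  | [u, v] =>
    let d1 := d.insert u (d.getD u 0 + 1)
    d1.insert v (d1.getD v 0 + 1)
  | _ => d

theorem buildDegB_eq (edges : List (List Int)) :
    buildDegB edges = edges.foldl degStep PySem.Dict.empty := rfl

theorem adjRel_cons_pair {a b : Int} {es : List (List Int)} {u v : Int} :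
    adjRel ([a, b] :: es) u v ↔ (u = a ∧ v = b) ∨ (u = b ∧ v = a) ∨ adjRel es u v := by
  simp only [adjRel, List.mem_cons, List.cons.injEq, and_true]
  tauto

theorem supp_cons_pair {a b : Int} {es : List (List Int)} {x : Int} :
    Supp ([a, b] :: es) x ↔ x = a ∨ x = b ∨ Supp es x := by
  unfold Supp
  constructor
  · rintro ⟨w, hw⟩
    rw [adjRel_cons_pair] at hw
    rcases hw with ⟨rfl, _⟩ | ⟨rfl, _⟩ | hw
    · exact Or.inl rfl
    · exact Or.inr (Or.inl rfl)
    · exact Or.inr (Or.inr ⟨w, hw⟩)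
  · rintro (rfl | rfl | ⟨w, hw⟩)
    · exact ⟨b, adjRel_cons_pair.2 (Or.inl ⟨rfl, rfl⟩)⟩
    · exact ⟨a, adjRel_cons_pair.2 (Or.inr (Or.inl ⟨rfl, rfl⟩))⟩
    · exact ⟨w, adjRel_cons_pair.2 (Or.inr (Or.inr hw))⟩

theorem supp_snoc {es : List (List Int)} {u v x : Int} :
    Supp (es ++ [[u, v]]) x ↔ Supp es x ∨ x = u ∨ x = v := by
  unfold Supp
  constructor
  · rintro ⟨w, hw⟩
    rw [adjRel_snoc] at hw
    rcases hw with hw | ⟨rfl, _⟩ | ⟨rfl, _⟩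
    · exact Or.inl ⟨w, hw⟩
    · exact Or.inr (Or.inl rfl)
    · exact Or.inr (Or.inr rfl)
  · rintro (⟨w, hw⟩ | rfl | rfl)
    · exact ⟨w, adjRel_snoc.2 (Or.inl hw)⟩
    · exact ⟨v, adjRel_snoc.2 (Or.inr (Or.inl ⟨rfl, rfl⟩))⟩
    · exact ⟨u, adjRel_snoc.2 (Or.inr (Or.inr ⟨rfl, rfl⟩))⟩

theorem mem_adjStep (d : PySem.Dict Int (List Int)) (a b u v : Int) :
    v ∈ (adjStep d [a, b]).getD u [] ↔
      v ∈ d.getD u [] ∨ (u = a ∧ v = b) ∨ (u = b ∧ v = a) := by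
  simp only [adjStep, PySem.Dict.getD_insert]
  split_ifs with h1 h2 h3
  · subst h1; subst h2
    simp only [List.mem_append, List.mem_singleton]
    tauto
  · subst h1
    simp only [List.mem_append, List.mem_singleton]
    constructor
    · rintro (h | h) <;> tauto
    · rintro (h | ⟨rfl, rfl⟩ | ⟨_, rfl⟩) <;> tauto
  · subst h3
    simp only [List.mem_append, List.mem_singleton]
    constructor
    · rintro (h | h) <;> tauto
    · rintro (h | ⟨_, rfl⟩ | ⟨rfl, rfl⟩) <;> tauto
  · constructor
    · exact Or.inl
    · rintro (h | ⟨rfl, rfl⟩ | ⟨rfl, rfl⟩) <;> tauto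

theorem contains_adjStep (d : PySem.Dict Int (List Int)) (a b u : Int) :
    (adjStep d [a, b]).contains u = true ↔ u = a ∨ u = b ∨ d.contains u = true := by
  simp only [adjStep, PySem.Dict.contains_insert, Bool.or_eq_true, beq_iff_eq]
  tauto

theorem mem_adjFold (es : List (List Int)) (pre : ∀ e ∈ es, e.length = 2) :
    ∀ (d : PySem.Dict Int (List Int)) (u v : Int),
      v ∈ (es.foldl adjStep d).getD u [] ↔ v ∈ d.getD u [] ∨ adjRel es u v := by
  induction es with
  | nil => intro d u v; simp [adjRel]
  | cons e es ih =>
      intro d u v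
      obtain ⟨a, b, rfl⟩ := List.length_eq_two.1 (pre e (by simp))
      simp only [List.foldl_cons]
      rw [ih (fun e he => pre e (by simp [he])), mem_adjStep, adjRel_cons_pair]
      tauto

theorem contains_adjFold (es : List (List Int)) (pre : ∀ e ∈ es, e.length = 2) :
    ∀ (d : PySem.Dict Int (List Int)) (u : Int),
      (es.foldl adjStep d).contains u = true ↔ d.contains u = true ∨ Supp es u := by
  induction es with
  | nil => intro d u; simp [Supp, adjRel]
  | cons e es ih =>
      intro d u
      obtain ⟨a, b, rfl⟩ := List.length_eq_two.1 (pre e (by simp))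
      simp only [List.foldl_cons]
      rw [ih (fun e he => pre e (by simp [he])), contains_adjStep, supp_cons_pair]
      tauto

theorem mem_buildAdjA (edges : List (List Int)) (pre : ∀ e ∈ edges, e.length = 2)
    (u v : Int) : v ∈ (buildAdjA edges).getD u [] ↔ adjRel edges u v := by
  rw [buildAdjA_eq, mem_adjFold edges pre]
  simp [PySem.Dict.getD_empty]

theorem contains_buildAdjA (edges : List (List Int)) (pre : ∀ e ∈ edges, e.length = 2)
    (u : Int) (h : Supp edges u) : (buildAdjA edges).contains u = true := by
  rw [buildAdjA_eq, contains_adjFold edges pre]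
  exact Or.inr h

theorem deg_adjStep (dd : PySem.Dict Int Int) (da : PySem.Dict Int (List Int)) (a b : Int)
    (hinv : ∀ u, dd.getD u 0 = Int.ofNat ((da.getD u []).length)) :
    ∀ u, (degStep dd [a, b]).getD u 0 = Int.ofNat (((adjStep da [a, b]).getD u []).length) := by
  intro u
  simp only [degStep, adjStep, PySem.Dict.getD_insert]
  split_ifs with h1 h2 <;>
    · simp [List.length_append, hinv a, hinv b, hinv u]
      try push_cast
      try ring

theorem degB_eq (edges : List (List Int)) (pre : ∀ e ∈ edges, e.length = 2) (u : Int) :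
    (buildDegB edges).getD u 0 = Int.ofNat ((buildAdjA edges).getD u []).length := by
  rw [buildAdjA_eq, buildDegB_eq]
  have main : ∀ (es : List (List Int)), (∀ e ∈ es, e.length = 2) →
      ∀ (dd : PySem.Dict Int Int) (da : PySem.Dict Int (List Int)),
      (∀ u, dd.getD u 0 = Int.ofNat ((da.getD u []).length)) →
      ∀ u, (es.foldl degStep dd).getD u 0 =
        Int.ofNat (((es.foldl adjStep da).getD u []).length) := by
    intro es
    induction es with
    | nil => intro _ dd da hinv u; exact hinv u
    | cons e es ih =>
        intro pre dd da hinv u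
        obtain ⟨a, b, rfl⟩ := List.length_eq_two.1 (pre e (by simp))
        simp only [List.foldl_cons]
        exact ih (fun e he => pre e (by simp [he])) _ _ (deg_adjStep dd da a b hinv) u
  exact main edges pre PySem.Dict.empty PySem.Dict.empty
    (by intro u; simp [PySem.Dict.getD_empty]) u

-- ===== the Avail relation: nodes a worklist can still reach, avoiding V =====
inductive Avail (adj : Int → List Int) (V : Int → Prop) (S : List Int) : Int → Prop
  | base {q v} : q ∈ S → v ∈ adj q → ¬ V v → Avail adj V S v
  | step {u v} : Avail adj V S u → v ∈ adj u → ¬ V v → Avail adj V S v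

theorem avail_not_avoid {adj V S x} (h : Avail adj V S x) : ¬ V x := by
  cases h <;> assumption

theorem avail_nil {adj V x} (h : Avail adj V [] x) : False := by
  induction h with
  | base hq _ _ => exact absurd hq (List.not_mem_nil)
  | step _ _ _ ih => exact ih

theorem avail_weaken {adj V V' S S' x} (h : Avail adj V' S x)
    (hV : ∀ y, V y → V' y) (hS : ∀ s ∈ S, s ∈ S') : Avail adj V S' x := by
  induction h with
  | base hq hm hv => exact Avail.base (hS _ hq) hm (fun c => hv (hV _ c))
  | step _ hm hv ih => exact Avail.step ih hm (fun c => hv (hV _ c))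

theorem avail_graft {adj V S1 S2 x} (h : Avail adj V S1 x)
    (hS : ∀ s ∈ S1, s ∈ S2 ∨ Avail adj V S2 s) : Avail adj V S2 x := by
  induction h with
  | base hq hm hv =>
      rcases hS _ hq with hs | hs
      · exact Avail.base hs hm hv
      · exact Avail.step hs hm hv
  | step _ hm hv ih => exact Avail.step ih hm hv

theorem avail_congr {adj : Int → List Int} {V V' : Int → Prop} {S : List Int} {x : Int}
    (hV : ∀ y, V y ↔ V' y) : Avail adj V S x ↔ Avail adj V' S x :=
  ⟨fun h => avail_weaken h (fun y hy => (hV y).2 hy) (fun _ hs => hs),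
   fun h => avail_weaken h (fun y hy => (hV y).1 hy) (fun _ hs => hs)⟩

theorem avail_core {adj : Int → List Int} {V : Int → Prop} {u : Int} {rest N : List Int}
    (hN : ∀ y, y ∈ N ↔ y ∈ adj u ∧ ¬ V y) (x : Int) :
    (x ∈ N ∨ Avail adj (fun y => V y ∨ y ∈ N) (rest ++ N) x) ↔ Avail adj V (u :: rest) x := by
  constructor
  · rintro (hx | hx)
    · obtain ⟨hm, hv⟩ := (hN x).1 hx
      exact Avail.base (List.mem_cons_self) hm hv
    · have hx' : Avail adj V (rest ++ N) x := avail_weaken hx (fun _ h => Or.inl h) (fun _ hs => hs)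
      refine avail_graft hx' ?_
      intro s hs
      rcases List.mem_append.1 hs with hs | hs
      · exact Or.inl (List.mem_cons_of_mem _ hs)
      · obtain ⟨hm, hv⟩ := (hN s).1 hs
        exact Or.inr (Avail.base (List.mem_cons_self) hm hv)
  · intro h
    induction h with
    | base hq hm hv =>
        rename_i q0 w
        rcases List.mem_cons.1 hq with rfl | hq
        · exact Or.inl ((hN w).2 ⟨hm, hv⟩)
        · by_cases hw : w ∈ N
          · exact Or.inl hw
          · exact Or.inr (Avail.base (List.mem_append_left _ hq) hm
              (by rintro (h | h) <;> [exact hv h; exact hw h]))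
    | step hA hm hv ih =>
        rename_i m w
        by_cases hw : w ∈ N
        · exact Or.inl hw
        · rcases ih with hmN | hmA
          · exact Or.inr (Avail.base (List.mem_append_right _ hmN) hm
              (by rintro (h | h) <;> [exact hv h; exact hw h]))
          · exact Or.inr (Avail.step hmA hm
              (by rintro (h | h) <;> [exact hv h; exact hw h]))

-- ===== the BFS loop =====
def pcls (adj : PySem.Dict Int (List Int)) (dp yp : Int) (y : Int) : Bool :=
  decide (PySem.Int.mod (Int.ofNat (adj.getD y []).length) 2 = dp ∧ PySem.Int.mod y 2 = yp)

def cntCls (adj : PySem.Dict Int (List Int)) (dp yp : Int) (P : List Int) : Int :=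
  Int.ofNat (P.countP (pcls adj dp yp))

theorem mod2_cases (a : Int) : PySem.Int.mod a 2 = 0 ∨ PySem.Int.mod a 2 = 1 := by
  have h1 := PySem.Int.mod_nonneg a (b := 2) (by norm_num)
  have h2 := PySem.Int.mod_lt a (b := 2) (by norm_num)
  omega

theorem nbr_fold (nbrs : List Int) : ∀ (vis : PySem.Set Int) (q : List Int),
    ∃ N : List Int,
      nbrs.foldl (fun (p : PySem.Set Int × List Int) v =>
        if v ∈ p.1 then p else (PySem.Set.add p.1 v, p.2 ++ [v])) (vis, q) =
        (vis ++ N, q ++ N) ∧ N.Nodup ∧ (∀ x, x ∈ N ↔ x ∈ nbrs ∧ x ∉ vis) := by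
  induction nbrs with
  | nil => exact fun vis q => ⟨[], by simp⟩
  | cons v nbrs ih =>
      intro vis q
      simp only [List.foldl_cons]
      by_cases hv : v ∈ vis
      · rw [if_pos hv]
        obtain ⟨N, heq, hnd, hmem⟩ := ih vis q
        refine ⟨N, heq, hnd, fun x => ?_⟩
        rw [hmem x]
        constructor
        · rintro ⟨h1, h2⟩; exact ⟨List.mem_cons_of_mem _ h1, h2⟩
        · rintro ⟨h1, h2⟩
          rcases List.mem_cons.1 h1 with rfl | h1
          · exact absurd hv h2
          · exact ⟨h1, h2⟩
      · rw [if_neg hv]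
        obtain ⟨N, heq, hnd, hmem⟩ := ih (PySem.Set.add vis v) (q ++ [v])
        rw [PySem.Set.add_of_not_mem hv] at heq hmem
        refine ⟨v :: N, ?_, ?_, ?_⟩
        · rw [PySem.Set.add_of_not_mem hv, heq]; simp
        · refine List.Nodup.cons (fun hvN => ?_) hnd
          exact ((hmem v).1 hvN).2 (by simp)
        · intro x
          rw [List.mem_cons, hmem x]
          simp only [List.mem_append, List.mem_cons]
          constructor
          · rintro (rfl | ⟨h1, h2⟩)
            · exact ⟨Or.inl rfl, hv⟩
            · exact ⟨Or.inr h1, fun hx => h2 (Or.inl hx)⟩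
          · rintro ⟨rfl | h1, h2⟩
            · exact Or.inl rfl
            · by_cases hxv : x = v
              · exact Or.inl hxv
              · refine Or.inr ⟨h1, fun hx => ?_⟩
                rcases hx with h | rfl | h
                · exact h2 h
                · exact hxv rfl
                · cases h

def clsIf (adj : PySem.Dict Int (List Int)) (dp yp u : Int) : Int :=
  if pcls adj dp yp u = true then 1 else 0

theorem cntCls_cons (adj : PySem.Dict Int (List Int)) (dp yp u : Int) (P : List Int) :
    cntCls adj dp yp (u :: P) = clsIf adj dp yp u + cntCls adj dp yp P := by
  simp only [cntCls, clsIf, List.countP_cons]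
  cases hp : pcls adj dp yp u
  · simp
  · simp
    omega

theorem bfsLoop_cons (adj : PySem.Dict Int (List Int)) (fuel : Nat) (u : Int) (q : List Int)
    (vis : PySem.Set Int) (co ce cro cre : Int) :
    bfsLoop adj (fuel + 1) (u :: q) vis co ce cro cre =
      bfsLoop adj fuel
        ((adj.getD u []).foldl (fun (p : PySem.Set Int × List Int) v =>
          if v ∈ p.1 then p else (PySem.Set.add p.1 v, p.2 ++ [v])) (vis, q)).2
        ((adj.getD u []).foldl (fun (p : PySem.Set Int × List Int) v =>
          if v ∈ p.1 then p else (PySem.Set.add p.1 v, p.2 ++ [v])) (vis, q)).1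
        (if PySem.Int.mod (Int.ofNat (adj.getD u []).length) 2 = 1 ∧ PySem.Int.mod u 2 = 1
         then (co + 1, ce, cro, cre)
         else if PySem.Int.mod (Int.ofNat (adj.getD u []).length) 2 = 0 ∧ PySem.Int.mod u 2 = 0
         then (co, ce + 1, cro, cre)
         else if PySem.Int.mod (Int.ofNat (adj.getD u []).length) 2 = 0 ∧ PySem.Int.mod u 2 = 1
         then (co, ce, cro + 1, cre)
         else ((co, ce, cro, cre + 1) : Int × Int × Int × Int)).1
        (if PySem.Int.mod (Int.ofNat (adj.getD u []).length) 2 = 1 ∧ PySem.Int.mod u 2 = 1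
         then (co + 1, ce, cro, cre)
         else if PySem.Int.mod (Int.ofNat (adj.getD u []).length) 2 = 0 ∧ PySem.Int.mod u 2 = 0
         then (co, ce + 1, cro, cre)
         else if PySem.Int.mod (Int.ofNat (adj.getD u []).length) 2 = 0 ∧ PySem.Int.mod u 2 = 1
         then (co, ce, cro + 1, cre)
         else ((co, ce, cro, cre + 1) : Int × Int × Int × Int)).2.1
        (if PySem.Int.mod (Int.ofNat (adj.getD u []).length) 2 = 1 ∧ PySem.Int.mod u 2 = 1
         then (co + 1, ce, cro, cre)
         else if PySem.Int.mod (Int.ofNat (adj.getD u []).length) 2 = 0 ∧ PySem.Int.mod u 2 = 0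
         then (co, ce + 1, cro, cre)
         else if PySem.Int.mod (Int.ofNat (adj.getD u []).length) 2 = 0 ∧ PySem.Int.mod u 2 = 1
         then (co, ce, cro + 1, cre)
         else ((co, ce, cro, cre + 1) : Int × Int × Int × Int)).2.2.1
        (if PySem.Int.mod (Int.ofNat (adj.getD u []).length) 2 = 1 ∧ PySem.Int.mod u 2 = 1
         then (co + 1, ce, cro, cre)
         else if PySem.Int.mod (Int.ofNat (adj.getD u []).length) 2 = 0 ∧ PySem.Int.mod u 2 = 0
         then (co, ce + 1, cro, cre)
         else if PySem.Int.mod (Int.ofNat (adj.getD u []).length) 2 = 0 ∧ PySem.Int.mod u 2 = 1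
         then (co, ce, cro + 1, cre)
         else ((co, ce, cro, cre + 1) : Int × Int × Int × Int)).2.2.2 := rfl

theorem cls_branch (adj : PySem.Dict Int (List Int)) (u : Int) (co ce cro cre : Int) :
    (if PySem.Int.mod (Int.ofNat (adj.getD u []).length) 2 = 1 ∧ PySem.Int.mod u 2 = 1
     then (co + 1, ce, cro, cre)
     else if PySem.Int.mod (Int.ofNat (adj.getD u []).length) 2 = 0 ∧ PySem.Int.mod u 2 = 0
     then (co, ce + 1, cro, cre)
     else if PySem.Int.mod (Int.ofNat (adj.getD u []).length) 2 = 0 ∧ PySem.Int.mod u 2 = 1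
     then (co, ce, cro + 1, cre)
     else ((co, ce, cro, cre + 1) : Int × Int × Int × Int)) =
    (co + clsIf adj 1 1 u, ce + clsIf adj 0 0 u, cro + clsIf adj 0 1 u, cre + clsIf adj 1 0 u) := by
  rcases mod2_cases (Int.ofNat (adj.getD u []).length) with h1 | h1 <;>
    rcases mod2_cases u with h2 | h2 <;>
      · simp only [clsIf, pcls, h1, h2]
        norm_num

theorem bfs_master (adj : PySem.Dict Int (List Int)) :
    ∀ (fuel : Nat) (q : List Int) (vis : PySem.Set Int) (co ce cro cre : Int),
    q.Nodup → (∀ x ∈ q, x ∈ vis) → (∀ x ∈ vis, x ∈ adj.keys) → vis.Nodup →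
    (∀ u v : Int, v ∈ adj.getD u [] → v ∈ adj.keys) →
    q.length + (adj.keys.toFinset \ vis.toFinset).card ≤ fuel →
    ∃ (P : List Int) (vis' : PySem.Set Int),
      bfsLoop adj fuel q vis co ce cro cre =
        (vis', co + cntCls adj 1 1 P, ce + cntCls adj 0 0 P,
               cro + cntCls adj 0 1 P, cre + cntCls adj 1 0 P) ∧
      P.Nodup ∧
      (∀ x, x ∈ P ↔ x ∈ q ∨ Avail (fun y => adj.getD y []) (· ∈ vis) q x) ∧
      (∀ x, x ∈ vis' ↔ x ∈ vis ∨ Avail (fun y => adj.getD y []) (· ∈ vis) q x) ∧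
      vis'.Nodup ∧ (∀ x ∈ vis', x ∈ adj.keys) := by
  intro fuel
  induction fuel with
  | zero =>
      intro q vis co ce cro cre hqnd hqv hvk hvnd hcl hfuel
      have hq : q = [] := List.eq_nil_of_length_eq_zero (by omega)
      subst hq
      refine ⟨[], vis, by simp [bfsLoop, cntCls], List.nodup_nil, ?_, ?_, hvnd, hvk⟩
      · intro x
        simp only [List.not_mem_nil, false_iff, false_or]
        exact fun h => (avail_nil h).elim
      · intro x
        constructor
        · exact fun h => Or.inl h
        · rintro (h | h)
          · exact h
          · exact (avail_nil h).elim
  | succ fuel ih =>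
      intro q vis co ce cro cre hqnd hqv hvk hvnd hcl hfuel
      cases q with
      | nil =>
          refine ⟨[], vis, by simp [bfsLoop, cntCls], List.nodup_nil, ?_, ?_, hvnd, hvk⟩
          · intro x
            simp only [List.not_mem_nil, false_iff, false_or]
            exact fun h => (avail_nil h).elim
          · intro x
            constructor
            · exact fun h => Or.inl h
            · rintro (h | h)
              · exact h
              · exact (avail_nil h).elim
      | cons u q =>
          obtain ⟨N, heq, hNnd, hNmem⟩ := nbr_fold (adj.getD u []) vis q
          have hNadj : ∀ x ∈ N, x ∈ adj.getD u [] := fun x hx => ((hNmem x).1 hx).1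
          have hNvis : ∀ x ∈ N, x ∉ vis := fun x hx => ((hNmem x).1 hx).2
          have hNkeys : ∀ x ∈ N, x ∈ adj.keys := fun x hx => hcl u x (hNadj x hx)
          have huvis : u ∈ vis := hqv u List.mem_cons_self
          -- invariants for the recursive call
          have hqnd' : (q ++ N).Nodup := by
            rw [List.nodup_append]
            exact ⟨(List.nodup_cons.1 hqnd).2, hNnd,
              fun a ha b hb hab => (hNvis b hb) (hab ▸ hqv a (List.mem_cons_of_mem _ ha))⟩
          have hqv' : ∀ x ∈ q ++ N, x ∈ vis ++ N := by
            intro x hx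
            rcases List.mem_append.1 hx with hx | hx
            · exact List.mem_append_left _ (hqv x (List.mem_cons_of_mem _ hx))
            · exact List.mem_append_right _ hx
          have hvk' : ∀ x ∈ vis ++ N, x ∈ adj.keys := by
            intro x hx
            rcases List.mem_append.1 hx with hx | hx
            · exact hvk x hx
            · exact hNkeys x hx
          have hvnd' : (vis ++ N).Nodup := by
            rw [List.nodup_append]
            exact ⟨hvnd, hNnd, fun a ha b hb hab => (hNvis b hb) (hab ▸ ha)⟩
          have hNcard : N.toFinset.card = N.length := List.toFinset_card_of_nodup hNnd
          have hsub : N.toFinset ⊆ adj.keys.toFinset \ vis.toFinset := by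
            intro x hx
            rw [List.mem_toFinset] at hx
            rw [Finset.mem_sdiff, List.mem_toFinset, List.mem_toFinset]
            exact ⟨hNkeys x hx, hNvis x hx⟩
          have hsd : adj.keys.toFinset \ (vis ++ N).toFinset =
              (adj.keys.toFinset \ vis.toFinset) \ N.toFinset := by
            ext a; simp only [Finset.mem_sdiff, List.toFinset_append, Finset.mem_union]; tauto
          have hfuel' : (q ++ N).length +
              (adj.keys.toFinset \ (vis ++ N).toFinset).card ≤ fuel := by
            rw [hsd, Finset.card_sdiff, Finset.inter_eq_left.mpr hsub, List.length_append,
              hNcard]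
            have hle : N.toFinset.card ≤ (adj.keys.toFinset \ vis.toFinset).card :=
              Finset.card_le_card hsub
            simp only [List.length_cons] at hfuel
            omega
          obtain ⟨P', vis', hEq, hPnd, hPmem, hVmem, hVnd, hVk⟩ :=
            ih (q ++ N) (vis ++ N) (co + clsIf adj 1 1 u) (ce + clsIf adj 0 0 u)
              (cro + clsIf adj 0 1 u) (cre + clsIf adj 1 0 u)
              hqnd' hqv' hvk' hvnd' hcl hfuel'
          have hAiff : ∀ z, Avail (fun y => adj.getD y []) (· ∈ vis ++ N) (q ++ N) z ↔
              Avail (fun y => adj.getD y []) (fun y => y ∈ vis ∨ y ∈ N) (q ++ N) z :=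
            fun z => avail_congr (fun y => by simp [List.mem_append])
          have hcore : ∀ z, (z ∈ N ∨
              Avail (fun y => adj.getD y []) (fun y => y ∈ vis ∨ y ∈ N) (q ++ N) z) ↔
              Avail (fun y => adj.getD y []) (· ∈ vis) (u :: q) z :=
            avail_core (fun y => hNmem y)
          refine ⟨u :: P', vis', ?_, ?_, ?_, ?_, hVnd, hVk⟩
          · rw [bfsLoop_cons, heq, cls_branch]
            refine hEq.trans ?_
            simp only [cntCls_cons, Prod.mk.injEq]
            and_intros <;> first | trivial | ring
          · refine List.Nodup.cons (fun hu => ?_) hPnd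
            rcases (hPmem u).1 hu with hu' | hu'
            · rcases List.mem_append.1 hu' with h | h
              · exact (List.nodup_cons.1 hqnd).1 h
              · exact hNvis u h huvis
            · exact avail_not_avoid hu' (List.mem_append_left _ huvis)
          · intro x
            rw [List.mem_cons, hPmem x]
            constructor
            · rintro (rfl | hq' | hA)
              · exact Or.inl List.mem_cons_self
              · rcases List.mem_append.1 hq' with h | h
                · exact Or.inl (List.mem_cons_of_mem _ h)
                · exact Or.inr ((hcore x).1 (Or.inl h))
              · exact Or.inr ((hcore x).1 (Or.inr ((hAiff x).1 hA)))
            · rintro (hq' | hA)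
              · rcases List.mem_cons.1 hq' with rfl | h
                · exact Or.inl rfl
                · exact Or.inr (Or.inl (List.mem_append_left _ h))
              · rcases (hcore x).2 hA with h | h
                · exact Or.inr (Or.inl (List.mem_append_right _ h))
                · exact Or.inr (Or.inr ((hAiff x).2 h))
          · intro x
            rw [hVmem x]
            constructor
            · rintro (hv | hA)
              · rcases List.mem_append.1 hv with h | h
                · exact Or.inl h
                · exact Or.inr ((hcore x).1 (Or.inl h))
              · exact Or.inr ((hcore x).1 (Or.inr ((hAiff x).1 hA)))
            · rintro (hv | hA)
              · exact Or.inl (List.mem_append_left _ hv)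
              · rcases (hcore x).2 hA with h | h
                · exact Or.inl (List.mem_append_right _ h)
                · exact Or.inr ((hAiff x).2 h)

-- ===== Avail ↔ Reach =====
theorem avail_reach_iff (edges : List (List Int)) (adj : PySem.Dict Int (List Int))
    (hadj : ∀ u v, v ∈ adj.getD u [] ↔ adjRel edges u v)
    (visP : List Int) (s : Int)
    (hclosed : ∀ a b, a ∈ visP → Reach edges a b → b ∈ visP) (hs : s ∉ visP)
    (W : Int → Prop) (hW : ∀ y, W y ↔ y ∈ visP ∨ y = s) (x : Int) :
    (x = s ∨ Avail (fun y => adj.getD y []) W [s] x) ↔ Reach edges s x := by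
  constructor
  · rintro (rfl | h)
    · exact Relation.ReflTransGen.refl
    · induction h with
      | base hq hm _ =>
          rcases List.mem_singleton.1 hq with rfl
          exact Relation.ReflTransGen.single ((hadj _ _).1 hm)
      | step _ hm _ ih => exact ih.tail ((hadj _ _).1 hm)
  · intro h
    induction h with
    | refl => exact Or.inl rfl
    | tail h1 h2 ih =>
        rename_i m y
        by_cases hys : y = s
        · exact Or.inl hys
        · have hyv : ¬ W y := by
            rw [hW]
            rintro (hy | rfl)
            · exact hs (hclosed y s hy (reach_symm (h1.tail h2)))
            · exact hys rfl
          have hym : y ∈ adj.getD m [] := (hadj _ _).2 h2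
          right
          rcases ih with rfl | ih
          · exact Avail.base (List.mem_singleton_self _) hym hyv
          · exact Avail.step ih hym hyv

-- ===== B-side: the label dict =====
theorem items_relabelB (d : PySem.Dict Int Int) (lv lu : Int) (h : d.keys.Nodup) :
    (relabelB d lv lu).items = d.items.map (fun p => (p.1, if p.2 = lv then lu else p.2)) := by
  unfold relabelB
  rw [PySem.Dict.items_foldl_insert_fresh d.items (fun p => p.1)
    (fun p => if p.2 = lv then lu else p.2) PySem.Dict.empty
    (fun a _ => PySem.Dict.contains_empty _)
    (by simpa only [PySem.Dict.keys] using h)]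
  rfl

theorem keys_relabelB (d : PySem.Dict Int Int) (lv lu : Int) (h : d.keys.Nodup) :
    (relabelB d lv lu).keys = d.keys := by
  simp only [PySem.Dict.keys, items_relabelB d lv lu h, List.map_map]
  rfl

theorem getD_relabelB (d : PySem.Dict Int Int) (lv lu : Int) (h : d.keys.Nodup)
    (x w : Int) (hx : d.get? x = some w) :
    (relabelB d lv lu).get? x = some (if w = lv then lu else w) := by
  have hmem : (x, w) ∈ d.items := PySem.Dict.mem_items_of_get?_eq_some _ hx
  have hmem' : (x, if w = lv then lu else w) ∈ (relabelB d lv lu).items := by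
    rw [items_relabelB d lv lu h]
    exact List.mem_map.2 ⟨(x, w), hmem, rfl⟩
  exact PySem.Dict.get?_of_mem_items _ hmem'
    (by rw [keys_relabelB d lv lu h]; exact h)

def LabInv (es : List (List Int)) (d : PySem.Dict Int Int) : Prop :=
  d.keys.Nodup ∧
  (∀ x, d.contains x = true ↔ Supp es x) ∧
  (∀ x l, d.get? x = some l → d.contains l = true) ∧
  (∀ x y, d.contains x = true → d.contains y = true →
    (d.getD x x = d.getD y y ↔ Reach es x y))

theorem labInv_nil : LabInv [] PySem.Dict.empty := by
  refine ⟨by simp [PySem.Dict.keys_empty], ?_, ?_, ?_⟩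
  · intro x; simp [PySem.Dict.contains_empty, Supp, adjRel]
  · intro x l hx; rw [PySem.Dict.get?_empty] at hx; cases hx
  · intro x y hx; rw [PySem.Dict.contains_empty] at hx; cases hx

theorem labInv_step (es : List (List Int)) (d : PySem.Dict Int Int) (u v : Int)
    (h : LabInv es d) : LabInv (es ++ [[u, v]]) (labelStepB d [u, v]) := by
  obtain ⟨hnd, hcont, hlab, hchar⟩ := h
  set d0 := if d.contains u then d else d.insert u u with hd0
  set d1 := if d0.contains v then d0 else d0.insert v v with hd1
  have hgoal : labelStepB d [u, v] =
      if d1.getD u u ≠ d1.getD v v then relabelB d1 (d1.getD v v) (d1.getD u u) else d1 := rfl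
  -- basic facts about d1
  have hnd0 : d0.keys.Nodup := by
    rw [hd0]; split_ifs with hc
    · exact hnd
    · exact PySem.Dict.nodup_keys_insert _ _ _ hnd
  have hnd1 : d1.keys.Nodup := by
    rw [hd1]; split_ifs with hc
    · exact hnd0
    · exact PySem.Dict.nodup_keys_insert _ _ _ hnd0
  have hcont0 : ∀ x, d0.contains x = true ↔ d.contains x = true ∨ x = u := by
    intro x; rw [hd0]; split_ifs with hc
    · constructor
      · exact Or.inl
      · rintro (hx | rfl) <;> [exact hx; exact hc]
    · rw [PySem.Dict.contains_insert]
      simp only [Bool.or_eq_true, beq_iff_eq]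
      tauto
  have hcont1 : ∀ x, d1.contains x = true ↔ d.contains x = true ∨ x = u ∨ x = v := by
    intro x; rw [hd1]; split_ifs with hc
    · rw [hcont0 x]
      constructor
      · rintro (hx | rfl)
        · exact Or.inl hx
        · exact Or.inr (Or.inl rfl)
      · rintro (hx | rfl | rfl)
        · exact Or.inl hx
        · exact Or.inr rfl
        · exact (hcont0 x).1 hc
    · rw [PySem.Dict.contains_insert]
      simp only [Bool.or_eq_true, beq_iff_eq]
      rw [hcont0 x]
      tauto
  have hgd0 : ∀ x, d0.getD x x = d.getD x x := by
    intro x; rw [hd0]; split_ifs with hc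
    · rfl
    · rw [PySem.Dict.getD_insert]
      split_ifs with hx
      · subst hx; exact (PySem.Dict.getD_of_not_contains d x (by simpa using hc)).symm
      · rfl
  have hgd1 : ∀ x, d1.getD x x = d.getD x x := by
    intro x; rw [hd1]; split_ifs with hc
    · exact hgd0 x
    · rw [PySem.Dict.getD_insert]
      split_ifs with hx
      · subst hx
        rw [← hgd0 x]
        exact (PySem.Dict.getD_of_not_contains d0 x (by simpa using hc)).symm
      · exact hgd0 x
  have hget0 : ∀ x l, d0.get? x = some l → d.get? x = some l ∨ (l = x ∧ x = u) := by
    intro x l hx; rw [hd0] at hx; split_ifs at hx with hc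
    · exact Or.inl hx
    · by_cases hxu : x = u
      · subst hxu
        rw [PySem.Dict.get?_insert_self] at hx
        exact Or.inr ⟨(Option.some.inj hx).symm, rfl⟩
      · rw [PySem.Dict.get?_insert_of_ne _ _ hxu] at hx
        exact Or.inl hx
  have hget1 : ∀ x l, d1.get? x = some l →
      d.get? x = some l ∨ (l = x ∧ (x = u ∨ x = v)) := by
    intro x l hx; rw [hd1] at hx; split_ifs at hx with hc
    · exact (hget0 x l hx).imp id (fun ⟨h1, h2⟩ => ⟨h1, Or.inl h2⟩)
    · by_cases hxv : x = v
      · subst hxv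
        rw [PySem.Dict.get?_insert_self] at hx
        exact Or.inr ⟨(Option.some.inj hx).symm, Or.inr rfl⟩
      · rw [PySem.Dict.get?_insert_of_ne _ _ hxv] at hx
        exact (hget0 x l hx).imp id (fun ⟨h1, h2⟩ => ⟨h1, Or.inl h2⟩)
  have hlab1 : ∀ x l, d1.get? x = some l → d1.contains l = true := by
    intro x l hx
    rcases hget1 x l hx with hx' | ⟨rfl, hx'⟩
    · exact (hcont1 l).2 (Or.inl (hlab x l hx'))
    · rcases hx' with rfl | rfl
      · exact (hcont1 l).2 (Or.inr (Or.inl rfl))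
      · exact (hcont1 l).2 (Or.inr (Or.inr rfl))
  -- labels of old keys avoid fresh keys
  have hgetD_old : ∀ x, d.contains x = true → ∃ w, d.get? x = some w ∧ d.getD x x = w := by
    intro x hx
    rw [PySem.Dict.contains_eq_isSome_get?] at hx
    obtain ⟨w, hw⟩ := Option.isSome_iff_exists.1 hx
    exact ⟨w, hw, by rw [PySem.Dict.getD_eq_get?_getD, hw]; rfl⟩
  have hX : ∀ x, d.contains x = true → ∀ z, ¬ d.contains z = true → d.getD x x ≠ z := by
    intro x hx z hz hne
    obtain ⟨w, hw, hgw⟩ := hgetD_old x hx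
    have hwz : w = z := by rw [← hgw]; exact hne
    exact hz (hwz ▸ hlab x w hw)
  have hfreshD : ∀ z, ¬ d.contains z = true → d.getD z z = z := by
    intro z hz; exact PySem.Dict.getD_of_not_contains d z (by simpa using hz)
  have hreach_fresh : ∀ z y, ¬ d.contains z = true → (Reach es z y ↔ z = y) := by
    intro z y hz
    constructor
    · intro hr
      rcases reach_supp hr with rfl | ⟨hs, _⟩
      · rfl
      · exact absurd ((hcont z).2 hs) hz
    · rintro rfl; exact Relation.ReflTransGen.refl
  have hchar1 : ∀ x y, d1.contains x = true → d1.contains y = true →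
      (d1.getD x x = d1.getD y y ↔ Reach es x y) := by
    intro x y hx hy
    rw [hgd1 x, hgd1 y]
    by_cases hdx : d.contains x = true <;> by_cases hdy : d.contains y = true
    · exact hchar x y hdx hdy
    · rw [hfreshD y hdy]
      constructor
      · intro hxy; exact absurd hxy (hX x hdx y hdy)
      · intro hr
        rcases reach_supp hr with rfl | ⟨_, hs⟩
        · exact absurd hdx hdy
        · exact absurd ((hcont y).2 hs) hdy
    · rw [hfreshD x hdx]
      constructor
      · intro hxy
        exact absurd hxy.symm (hX y hdy x hdx)
      · intro hr
        rcases reach_supp (reach_symm hr) with rfl | ⟨_, hs⟩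
        · exact absurd hdy hdx
        · exact absurd ((hcont x).2 hs) hdx
    · rw [hfreshD x hdx, hfreshD y hdy]
      rw [hreach_fresh x y hdx]
  have hcu1 : d1.contains u = true := (hcont1 u).2 (Or.inr (Or.inl rfl))
  have hcv1 : d1.contains v = true := (hcont1 v).2 (Or.inr (Or.inr rfl))
  have hcontSnoc : ∀ x, d1.contains x = true ↔ Supp (es ++ [[u, v]]) x := by
    intro x
    rw [hcont1 x, supp_snoc, hcont x]
  by_cases hlulv : d1.getD u u = d1.getD v v
  · have huv : Reach es u v := (hchar1 u v hcu1 hcv1).1 hlulv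
    rw [hgoal, if_neg (fun hne => hne hlulv)]
    exact ⟨hnd1, hcontSnoc, hlab1, fun x y hx hy => by
      rw [reach_snoc_same huv]; exact hchar1 x y hx hy⟩
  · rw [hgoal, if_pos hlulv]
    set lu := d1.getD u u with hlu
    set lv := d1.getD v v with hlv
    set rl := relabelB d1 lv lu with hrl
    have hkeysrl : rl.keys = d1.keys := keys_relabelB d1 lv lu hnd1
    have hndrl : rl.keys.Nodup := by rw [hkeysrl]; exact hnd1
    have hcontrl : ∀ x, rl.contains x = true ↔ d1.contains x = true := by
      intro x
      rw [PySem.Dict.contains_iff_mem_keys, PySem.Dict.contains_iff_mem_keys, hkeysrl]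
    have hget1D : ∀ x, d1.contains x = true → d1.get? x = some (d1.getD x x) := by
      intro x hx
      rw [PySem.Dict.contains_eq_isSome_get?] at hx
      obtain ⟨w, hw⟩ := Option.isSome_iff_exists.1 hx
      rw [hw, PySem.Dict.getD_eq_get?_getD, hw]
      rfl
    have hgdrl : ∀ x, d1.contains x = true →
        rl.getD x x = (if d1.getD x x = lv then lu else d1.getD x x) := by
      intro x hx
      have := getD_relabelB d1 lv lu hnd1 x _ (hget1D x hx)
      rw [PySem.Dict.getD_eq_get?_getD, this]
      rfl
    have hlabrl : ∀ x l, rl.get? x = some l → rl.contains l = true := by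
      intro x l hx
      have hcx : rl.contains x = true := by
        rw [PySem.Dict.contains_eq_isSome_get?, hx]; rfl
      have hcx1 : d1.contains x = true := (hcontrl x).1 hcx
      have := getD_relabelB d1 lv lu hnd1 x _ (hget1D x hcx1)
      rw [this] at hx
      have hl : l = if d1.getD x x = lv then lu else d1.getD x x := (Option.some.inj hx).symm
      rw [hl]
      split_ifs with hc
      · exact (hcontrl lu).2 (hlab1 u lu (hget1D u hcu1))
      · exact (hcontrl _).2 (hlab1 x _ (hget1D x hcx1))
    refine ⟨hndrl, fun x => (hcontrl x).trans (hcontSnoc x), hlabrl, ?_⟩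
    intro x y hx hy
    have hx1 : d1.contains x = true := (hcontrl x).1 hx
    have hy1 : d1.contains y = true := (hcontrl y).1 hy
    have Hxy := hchar1 x y hx1 hy1
    have Hxu := hchar1 x u hx1 hcu1
    have Hxv := hchar1 x v hx1 hcv1
    have Hyu := hchar1 y u hy1 hcu1
    have Hyv := hchar1 y v hy1 hcv1
    rw [hgdrl x hx1, hgdrl y hy1, reach_snoc]
    by_cases hxlv : d1.getD x x = lv <;> by_cases hylv : d1.getD y y = lv
    · rw [if_pos hxlv, if_pos hylv]
      constructor
      · intro _
        exact Or.inl ((Hxv.1 hxlv).trans (reach_symm (Hyv.1 hylv)))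
      · intro _; rfl
    · rw [if_pos hxlv, if_neg hylv]
      constructor
      · intro hl
        exact Or.inr (Or.inr ⟨Hxv.1 hxlv, reach_symm (Hyu.1 hl.symm)⟩)
      · rintro (hr | ⟨hr1, hr2⟩ | ⟨hr1, hr2⟩)
        · exact absurd ((Hxy.2 hr).symm.trans hxlv) hylv
        · exact absurd (Hyv.2 (reach_symm hr2)) hylv
        · exact (Hyu.2 (reach_symm hr2)).symm
    · rw [if_neg hxlv, if_pos hylv]
      constructor
      · intro hl
        exact Or.inr (Or.inl ⟨Hxu.1 hl, reach_symm (Hyv.1 hylv)⟩)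
      · rintro (hr | ⟨hr1, hr2⟩ | ⟨hr1, hr2⟩)
        · exact absurd ((Hxy.2 hr).trans hylv) hxlv
        · exact Hxu.2 hr1
        · exact absurd (Hxv.2 hr1) hxlv
    · rw [if_neg hxlv, if_neg hylv]
      rw [Hxy]
      constructor
      · exact Or.inl
      · rintro (hr | ⟨hr1, hr2⟩ | ⟨hr1, hr2⟩)
        · exact hr
        · exact absurd (Hyv.2 (reach_symm hr2)) hylv
        · exact absurd (Hxv.2 hr1) hxlv

theorem labInv_final (edges : List (List Int)) (pre : ∀ e ∈ edges, e.length = 2) :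
    LabInv edges (edges.foldl labelStepB PySem.Dict.empty) := by
  induction edges using List.reverseRecOn with
  | nil => exact labInv_nil
  | append_singleton es e ih =>
      obtain ⟨a, b, rfl⟩ := List.length_eq_two.1 (pre e (by simp))
      rw [List.foldl_append]
      exact labInv_step es _ a b (ih (fun e he => pre e (by simp [he])))

theorem blockOf_char (edges : List (List Int)) (d : PySem.Dict Int Int)
    (h : LabInv edges d) (x : Int) :
    (blockOfB d x).Nodup ∧ (∀ y, y ∈ blockOfB d x ↔ Reach edges x y) := by
  obtain ⟨hnd, hcont, hlab, hchar⟩ := h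
  unfold blockOfB
  cases hget : d.get? x with
  | none =>
      have hnc : ¬ d.contains x = true := by
        rw [PySem.Dict.contains_eq_isSome_get?, hget]; simp
      have hns : ¬ Supp edges x := fun hs => hnc ((hcont x).2 hs)
      refine ⟨List.nodup_singleton _, fun y => ?_⟩
      rw [List.mem_singleton]
      constructor
      · rintro rfl; exact Relation.ReflTransGen.refl
      · intro hr
        rcases reach_supp hr with rfl | ⟨hs, _⟩
        · rfl
        · exact absurd hs hns
  | some lx =>
      have hcx : d.contains x = true := by
        rw [PySem.Dict.contains_eq_isSome_get?, hget]; rfl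
      have hgx : d.getD x x = lx := by
        rw [PySem.Dict.getD_eq_get?_getD, hget]; rfl
      refine ⟨hnd.filter _, fun y => ?_⟩
      rw [List.mem_filter]
      constructor
      · rintro ⟨hy, hlxy⟩
        have hcy : d.contains y = true := (PySem.Dict.contains_iff_mem_keys _ _).2 hy
        have : d.getD y y = lx := by simpa using hlxy
        exact (hchar x y hcx hcy).1 (by rw [hgx, this])
      · intro hr
        have hcy : d.contains y = true := by
          rcases reach_supp hr with rfl | ⟨_, hs⟩
          · exact hcx
          · exact (hcont y).2 hs
        refine ⟨(PySem.Dict.contains_iff_mem_keys _ _).1 hcy, ?_⟩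
        have := (hchar x y hcx hcy).2 hr
        simp [← this, hgx]

-- ===== the outer loops =====
def stepA (adj : PySem.Dict Int (List Int)) (st : PySem.Set Int × Int × Int)
    (start : Int) : PySem.Set Int × Int × Int :=
  if start ∈ st.1 then st
  else
    let vis := PySem.Set.add st.1 start
    let r := bfsLoop adj (adj.keys.length + 1) [start] vis 0 0 0 0
    let aoe := if (r.2.2.2.1 = 1 ∧ r.2.2.2.2 = 0) ∨ (r.2.2.2.1 = 0 ∧ r.2.2.2.2 = 1)
               then st.2.1 + 1 else st.2.1
    let aroe := if (r.2.1 = 1 ∧ r.2.2.1 = 0) ∨ (r.2.1 = 0 ∧ r.2.2.1 = 1)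
                then st.2.2 + 1 else st.2.2
    (r.1, aoe, aroe)

def stepB (label : PySem.Dict Int Int) (deg : PySem.Dict Int Int)
    (st : PySem.Set Int × Int × Int) (x : Int) : PySem.Set Int × Int × Int :=
  if x ∈ st.1 then st
  else
    let blk := blockOfB label x
    let seen := PySem.Set.update st.1 blk
    let co := countIfB blk deg 1 1
    let ce := countIfB blk deg 0 0
    let cro := countIfB blk deg 1 0
    let cre := countIfB blk deg 0 1
    let arev := if (co = 1 ∧ ce = 0) ∨ (co = 0 ∧ ce = 1) then st.2.1 + 1 else st.2.1
    let aoe := if (cro = 1 ∧ cre = 0) ∨ (cro = 0 ∧ cre = 1) then st.2.2 + 1 else st.2.2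
    (seen, arev, aoe)

theorem outer_loop (edges : List (List Int)) (nodes0 : List Int)
    (pre : ∀ e ∈ edges, e.length = 2) :
    ∀ (ns : List Int) (visA seenB : PySem.Set Int) (aoeA aroeA arevB aoeB : Int),
    (∀ x ∈ ns, x ∈ nodes0) →
    visA.Nodup → (∀ x ∈ visA, x ∈ (touchA (buildAdjA edges) nodes0).keys) →
    (∀ a b, a ∈ visA → Reach edges a b → b ∈ visA) →
    (∀ z, z ∈ visA ↔ z ∈ seenB) → aoeA = aoeB → aroeA = arevB →
    ((ns.foldl (stepA (touchA (buildAdjA edges) nodes0)) (visA, aoeA, aroeA)).2.1 =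
      (ns.foldl (stepB (edges.foldl labelStepB PySem.Dict.empty) (buildDegB edges))
        (seenB, arevB, aoeB)).2.2 ∧
     (ns.foldl (stepA (touchA (buildAdjA edges) nodes0)) (visA, aoeA, aroeA)).2.2 =
      (ns.foldl (stepB (edges.foldl labelStepB PySem.Dict.empty) (buildDegB edges))
        (seenB, arevB, aoeB)).2.1) := by
  intro ns
  induction ns with
  | nil =>
      intro visA seenB aoeA aroeA arevB aoeB _ _ _ _ _ haoe haroe
      exact ⟨haoe, haroe⟩
  | cons x ns ih =>
      intro visA seenB aoeA aroeA arevB aoeB hns hnd hkeys hclosed hvisEq haoe haroe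
      have hxB : (x ∈ visA) ↔ (x ∈ seenB) := hvisEq x
      simp only [List.foldl_cons]
      by_cases hx : x ∈ visA
      · rw [show stepA (touchA (buildAdjA edges) nodes0) (visA, aoeA, aroeA) x =
              (visA, aoeA, aroeA) from by simp [stepA, hx],
            show stepB (edges.foldl labelStepB PySem.Dict.empty) (buildDegB edges)
              (seenB, arevB, aoeB) x = (seenB, arevB, aoeB) from by
                simp [stepB, hxB.1 hx]]
        exact ih visA seenB aoeA aroeA arevB aoeB (fun y hy => hns y (List.mem_cons_of_mem _ hy))
          hnd hkeys hclosed hvisEq haoe haroe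
      · have hxB' : x ∉ seenB := fun hxb => hx (hxB.2 hxb)
        set adj := touchA (buildAdjA edges) nodes0 with hadj
        set label := edges.foldl labelStepB PySem.Dict.empty with hlabel
        set deg := buildDegB edges with hdeg
        have hadjD : ∀ u w, w ∈ adj.getD u [] ↔ adjRel edges u w := by
          intro u w
          rw [hadj, getD_touchA]
          exact mem_buildAdjA edges pre u w
        have hkeyOf : ∀ z, (∃ w, adjRel edges z w) ∨ z ∈ nodes0 → z ∈ adj.keys := by
          intro z hz
          rw [← PySem.Dict.contains_iff_mem_keys, hadj, contains_touchA]
          rcases hz with ⟨w, hw⟩ | hz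
          · exact Or.inl (contains_buildAdjA edges pre z ⟨w, hw⟩)
          · exact Or.inr hz
        have hxkeys : x ∈ adj.keys := hkeyOf x (Or.inr (hns x List.mem_cons_self))
        have hvis1 : PySem.Set.add visA x = visA ++ [x] := PySem.Set.add_of_not_mem hx
        have hvis1nd : (visA ++ [x]).Nodup := by
          rw [List.nodup_append]
          exact ⟨hnd, List.nodup_singleton _,
            fun a ha b hb hab => hx ((List.mem_singleton.1 hb ▸ hab) ▸ ha)⟩
        have hvis1k : ∀ z ∈ visA ++ [x], z ∈ adj.keys := by
          intro z hz
          rcases List.mem_append.1 hz with hz | hz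
          · exact hkeys z hz
          · exact List.mem_singleton.1 hz ▸ hxkeys
        have hcl : ∀ u w : Int, w ∈ adj.getD u [] → w ∈ adj.keys := by
          intro u w hw
          exact hkeyOf w (Or.inl ⟨u, adjRel_symm ((hadjD u w).1 hw)⟩)
        have hfuel : ([x] : List Int).length +
            (adj.keys.toFinset \ (visA ++ [x]).toFinset).card ≤ adj.keys.length + 1 := by
          have h1 : (adj.keys.toFinset \ (visA ++ [x]).toFinset).card ≤ adj.keys.toFinset.card :=
            Finset.card_le_card (Finset.sdiff_subset)
          have h2 : adj.keys.toFinset.card ≤ adj.keys.length := adj.keys.toFinset_card_le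
          simp only [List.length_singleton]
          omega
        obtain ⟨P, vis', hEq, hPnd, hPmem, hVmem, hVnd, hVk⟩ :=
          bfs_master adj (adj.keys.length + 1) [x] (visA ++ [x]) 0 0 0 0
            (List.nodup_singleton x)
            (fun z hz => List.mem_append_right _ hz)
            hvis1k hvis1nd hcl hfuel
        have havail := avail_reach_iff edges adj hadjD visA x hclosed hx
          (· ∈ visA ++ [x]) (fun y => by simp) 
        have hPReach : ∀ z, z ∈ P ↔ Reach edges x z := by
          intro z
          rw [hPmem z, List.mem_singleton]
          exact havail z
        have hVReach : ∀ z, z ∈ vis' ↔ z ∈ visA ∨ Reach edges x z := by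
          intro z
          rw [hVmem z, ← havail z, List.mem_append, List.mem_singleton]
          tauto
        obtain ⟨hBnd, hBmem⟩ := blockOf_char edges label (labInv_final edges pre) x
        have hperm : P.Perm (blockOfB label x) :=
          (List.perm_ext_iff_of_nodup hPnd hBnd).2
            (fun z => (hPReach z).trans ((hBmem z).symm))
        have hcnt : ∀ dp yp : Int, countIfB (blockOfB label x) deg yp dp = cntCls adj dp yp P := by
          intro dp yp
          unfold countIfB cntCls
          congr 1
          rw [hperm.countP_eq]
          refine List.countP_congr (fun y _ => ?_)
          simp only [pcls, decide_eq_true_eq]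
          constructor
          · rintro ⟨h1, h2⟩
            refine ⟨?_, h1⟩
            rw [hdeg, degB_eq edges pre y, ← getD_touchA nodes0 (buildAdjA edges) y, ← hadj] at h2
            exact h2
          · rintro ⟨h1, h2⟩
            refine ⟨h2, ?_⟩
            rw [hdeg, degB_eq edges pre y, ← getD_touchA nodes0 (buildAdjA edges) y, ← hadj]
            exact h1
        have hAstep : stepA adj (visA, aoeA, aroeA) x =
            (vis',
             (if (cntCls adj 0 1 P = 1 ∧ cntCls adj 1 0 P = 0) ∨
                 (cntCls adj 0 1 P = 0 ∧ cntCls adj 1 0 P = 1) then aoeA + 1 else aoeA),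
             (if (cntCls adj 1 1 P = 1 ∧ cntCls adj 0 0 P = 0) ∨
                 (cntCls adj 1 1 P = 0 ∧ cntCls adj 0 0 P = 1) then aroeA + 1 else aroeA)) := by
          simp only [stepA, hx, if_false]
          rw [show PySem.Set.add visA x = visA ++ [x] from hvis1]
          rw [hEq]
          simp only [zero_add]
        have hBstep : stepB label deg (seenB, arevB, aoeB) x =
            (PySem.Set.update seenB (blockOfB label x),
             (if (cntCls adj 1 1 P = 1 ∧ cntCls adj 0 0 P = 0) ∨
                 (cntCls adj 1 1 P = 0 ∧ cntCls adj 0 0 P = 1) then arevB + 1 else arevB),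
             (if (cntCls adj 0 1 P = 1 ∧ cntCls adj 1 0 P = 0) ∨
                 (cntCls adj 0 1 P = 0 ∧ cntCls adj 1 0 P = 1) then aoeB + 1 else aoeB)) := by
          simp only [stepB, hxB', if_false]
          rw [hcnt 1 1, hcnt 0 0, hcnt 0 1, hcnt 1 0]
        rw [hAstep, hBstep]
        refine ih vis' (PySem.Set.update seenB (blockOfB label x)) _ _ _ _
          (fun y hy => hns y (List.mem_cons_of_mem _ hy)) hVnd hVk ?_ ?_
          (by rw [haoe]) (by rw [haroe])
        · intro a b ha hr
          rcases (hVReach a).1 ha with ha' | ha'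
          · exact (hVReach b).2 (Or.inl (hclosed a b ha' hr))
          · exact (hVReach b).2 (Or.inr (ha'.trans hr))
        · intro z
          rw [hVReach z, PySem.Set.mem_update, ← hvisEq z, hBmem z]

-- ===== VERDICT (by name: the statement is the Claim_ definition above) =====
theorem solution_spec : Claim_equal_solution := by
  intro nodes edges _ hpre
  unfold Spec_solution
  have h := outer_loop edges nodes hpre nodes PySem.Set.empty PySem.Set.empty 0 0 0 0
    (fun _ hx => hx) List.nodup_nil (by intro x hx; cases hx)
    (by intro a b ha; cases ha) (fun z => Iff.rfl) rfl rfl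
  have eA : solution nodes edges =
      [(nodes.foldl (stepA (touchA (buildAdjA edges) nodes))
          (PySem.Set.empty, 0, 0)).2.2,
       (nodes.foldl (stepA (touchA (buildAdjA edges) nodes))
          (PySem.Set.empty, 0, 0)).2.1] := rfl
  have eB : solution_alt nodes edges =
      [(nodes.foldl (stepB (edges.foldl labelStepB PySem.Dict.empty) (buildDegB edges))
          (PySem.Set.empty, 0, 0)).2.1,
       (nodes.foldl (stepB (edges.foldl labelStepB PySem.Dict.empty) (buildDegB edges))
          (PySem.Set.empty, 0, 0)).2.2] := rfl
  rw [eA, eB, h.1, h.2]
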